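-- pv_equiv track=rewrite | github.com/fiecll/chesscomp | submission.py | count_forward_squares
-- ===== SOURCE A (Python) =====
-- def count_forward_squares(square, color):
--     """
--     指定された駒の前方のマス数をカウントする。
--     """
--     rank = square // 8
--     direction = 1 if color == 'white' else -1
--     forward_squares = 0
--
--     r = rank + direction
--     while 0 <= r < 8:
--         forward_squares += 1
--         r += direction
--
--     return forward_squares
-- ===== SOURCE B (Python) =====
-- def count_forward_squares(square, color):
--     """Closed form: the loop counts consecutive ranks starting at rank+direction
--     while on the board, so the answer is the distance from the entry rank to the
--     board edge in that direction (0 if the entry rank is off-board)."""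
--     rank = square // 8
--     if color == 'white':
--         start = rank + 1
--         return 8 - start if 0 <= start < 8 else 0
--     start = rank - 1
--     return start + 1 if 0 <= start < 8 else 0
-- ===== Notes on version B (the rewrite author's own statement) =====
-- stated objective: simpler
-- what changed: Replaces the rank-stepping while loop with a closed-form edge-distance formula (8-start for white, start+1 for black, 0 when the entry rank is off-board).
import Mathlib
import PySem

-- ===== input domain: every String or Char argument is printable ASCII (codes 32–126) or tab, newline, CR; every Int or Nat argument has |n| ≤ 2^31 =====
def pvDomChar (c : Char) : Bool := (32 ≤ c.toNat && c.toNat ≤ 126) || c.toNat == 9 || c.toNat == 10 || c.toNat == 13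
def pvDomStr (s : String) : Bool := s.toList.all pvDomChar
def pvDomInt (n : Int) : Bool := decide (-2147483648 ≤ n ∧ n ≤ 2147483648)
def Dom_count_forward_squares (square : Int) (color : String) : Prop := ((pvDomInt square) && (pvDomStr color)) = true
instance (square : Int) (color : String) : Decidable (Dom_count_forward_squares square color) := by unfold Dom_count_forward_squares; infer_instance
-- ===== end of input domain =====

-- B replaces A's rank-stepping while loop by a closed-form edge-distance formula; return values agree on all inputs.

-- ===== PORT A =====
-- A's while loop: step r by direction (±1) while 0 ≤ r < 8, counting steps.
def cfsLoop (r : Int) (d : Int) (hd : d = 1 ∨ d = -1) (acc : Int) : Int :=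
  if 0 ≤ r ∧ r < 8 then cfsLoop (r + d) d hd (acc + 1) else acc
termination_by (if d = 1 then 8 - r else r + 1).toNat
decreasing_by rcases hd with h | h <;> simp [h] <;> omega

def count_forward_squares (square : Int) (color : String) : Int :=
  let rank := PySem.Int.floordiv square 8
  let direction : Int := if color == "white" then 1 else -1
  cfsLoop (rank + direction) direction
    (by by_cases h : color == "white" <;> simp [direction, h]) 0

-- ===== PORT B =====
def count_forward_squares_alt (square : Int) (color : String) : Int :=
  let rank := PySem.Int.floordiv square 8
  if color == "white" then
    let start := rank + 1
    if 0 ≤ start ∧ start < 8 then 8 - start else 0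
  else
    let start := rank - 1
    if 0 ≤ start ∧ start < 8 then start + 1 else 0

-- ===== PRECONDITION & SPEC =====
def Spec_count_forward_squares (square : Int) (color : String) (out : Int) : Prop := out = count_forward_squares_alt square color
instance (square : Int) (color : String) (out : Int) : Decidable (Spec_count_forward_squares square color out) := by unfold Spec_count_forward_squares; infer_instance

-- ===== CLAIM (what is proved, stated in full; the proofs are below) =====
def Claim_equal_count_forward_squares : Prop := ∀ (square : Int) (color : String), Dom_count_forward_squares square color → Spec_count_forward_squares square color (count_forward_squares square color)

-- ===== LEMMAS AND PROOFS =====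

-- Upward loop: starting at r, it counts the ranks from r to 7 (if r is on-board).
theorem cfsLoop_up (r acc : Int) (hd : (1:Int) = 1 ∨ (1:Int) = -1) :
    cfsLoop r 1 hd acc = if 0 ≤ r ∧ r < 8 then acc + (8 - r) else acc := by
  by_cases h : 0 ≤ r ∧ r < 8
  · obtain ⟨h0, h8⟩ := h
    -- induction on the distance to the upper edge
    generalize hg : (8 - r).toNat = k at *
    induction k generalizing r acc with
    | zero => omega
    | succ n ih =>
      rw [cfsLoop]
      simp only [if_pos (by omega : 0 ≤ r ∧ r < 8)]
      by_cases h' : 0 ≤ r + 1 ∧ r + 1 < 8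
      · rw [ih (r + 1) (acc + 1) h'.1 h'.2 (by omega), if_pos h']; omega
      · rw [cfsLoop]; simp [h']; omega
  · rw [cfsLoop]; simp [h]

-- Downward loop: starting at r, it counts the ranks from r down to 0 (if r is on-board).
theorem cfsLoop_down (r acc : Int) (hd : (-1:Int) = 1 ∨ (-1:Int) = -1) :
    cfsLoop r (-1) hd acc = if 0 ≤ r ∧ r < 8 then acc + (r + 1) else acc := by
  by_cases h : 0 ≤ r ∧ r < 8
  · obtain ⟨h0, h8⟩ := h
    generalize hg : (r + 1).toNat = k at *
    induction k generalizing r acc with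
    | zero => omega
    | succ n ih =>
      rw [cfsLoop]
      simp only [if_pos (by omega : 0 ≤ r ∧ r < 8)]
      by_cases h' : 0 ≤ r - 1 ∧ r - 1 < 8
      · rw [show r + -1 = r - 1 by ring, ih (r - 1) (acc + 1) h'.1 h'.2 (by omega), if_pos h']
        omega
      · rw [cfsLoop, if_neg (by omega : ¬(0 ≤ r + -1 ∧ r + -1 < 8))]; omega
  · rw [cfsLoop]; simp [h]

-- ===== VERDICT (by name: the statement is the Claim_ definition above) =====
theorem count_forward_squares_spec : Claim_equal_count_forward_squares := by
  intro square color _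
  unfold Spec_count_forward_squares count_forward_squares count_forward_squares_alt
  by_cases h : color == "white" <;>
    simp only [h, Bool.false_eq_true, if_pos, ite_false]
  · rw [cfsLoop_up]
    split <;> omega
  · rw [cfsLoop_down]
    split <;> omega
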